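-- pv_equiv track=rewrite | github.com/VassilisSoum/Tracetap | tracetap-ai-postman.py | _extract_intent_keywords
-- ===== SOURCE A (Python) =====
-- from typing import List, Dict, Any, Optional
--
-- def _extract_intent_keywords(intent: str) -> List[str]:
--     """Extract keywords from flow intent with minimal filtering"""
--     if not intent:
--         return []
--
--     # Convert to lowercase and split
--     words = intent.lower().split()
--
--     # Only filter out the most basic articles and conjunctions
--     basic_stopwords = {'a', 'an', 'the', 'and', 'or', 'to', 'of', 'in', 'on'}
--
--     # Keep keywords that are at least 3 characters
--     keywords = []
--     for w in words:
--         cleaned = w.strip(',.!?;:')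
--         if len(cleaned) >= 3 and cleaned not in basic_stopwords:
--             keywords.append(cleaned)
--
--     # Create compound keywords for consecutive meaningful words
--     compound_keywords = []
--     for i in range(len(words) - 1):
--         word1 = words[i].strip(',.!?;:')
--         word2 = words[i + 1].strip(',.!?;:')
--
--         if (word1 not in basic_stopwords and word2 not in basic_stopwords and
--                 len(word1) >= 3 and len(word2) >= 3):
--             compound = word1 + word2
--             compound_keywords.append(compound)
--
--     return keywords + compound_keywords
-- ===== SOURCE B (Python) =====
-- from typing import List
--
-- def _extract_intent_keywords(intent: str) -> List[str]:
--     """Extract keywords from flow intent with minimal filtering (single pass)."""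
--     basic_stopwords = {'a', 'an', 'the', 'and', 'or', 'to', 'of', 'in', 'on'}
--     keywords = []
--     compounds = []
--     prev_clean, prev_valid = '', False
--     for w in intent.lower().split():
--         cleaned = w.strip(',.!?;:')
--         valid = len(cleaned) >= 3 and cleaned not in basic_stopwords
--         if valid:
--             keywords.append(cleaned)
--             if prev_valid:
--                 compounds.append(prev_clean + cleaned)
--         prev_clean, prev_valid = cleaned, valid
--     return keywords + compounds
-- ===== Notes on version B (the rewrite author's own statement) =====
-- stated objective: simpler
-- what changed: Replaces A's two separate passes (a keyword loop plus an index-based range(len-1) loop re-cleaning each word twice for compounds) with a single pass over the words that carries the previous word's cleaned form and validity, cleaning each word exactly once.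
import Mathlib
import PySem

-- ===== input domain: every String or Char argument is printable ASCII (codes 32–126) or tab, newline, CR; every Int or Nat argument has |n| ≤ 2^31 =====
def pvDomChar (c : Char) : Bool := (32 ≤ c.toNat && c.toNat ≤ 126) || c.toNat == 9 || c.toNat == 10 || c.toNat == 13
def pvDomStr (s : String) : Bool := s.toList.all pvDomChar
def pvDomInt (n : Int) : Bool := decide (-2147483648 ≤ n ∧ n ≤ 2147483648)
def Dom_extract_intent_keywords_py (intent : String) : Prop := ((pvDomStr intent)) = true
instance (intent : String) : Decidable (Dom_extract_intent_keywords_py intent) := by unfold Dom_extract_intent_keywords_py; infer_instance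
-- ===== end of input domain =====

-- B fuses A's two passes (keyword pass + index-based compound pass) into one pass that
-- carries the previous word's cleaned form and validity; objective: simpler (one traversal, no indexing).

-- ===== PORT A =====
-- the set literal basic_stopwords
def pvStop : PySem.Set String :=
  PySem.Set.ofList ["a", "an", "the", "and", "or", "to", "of", "in", "on"]

def extract_intent_keywords_py (intent : String) : List String :=
  if intent = "" then []
  else
    let words := PySem.Str.split₀ (PySem.Str.lower intent)
    let keywords := words.foldl (fun acc w =>
      let cleaned := PySem.Str.stripChars w ",.!?;:"
      if 3 ≤ PySem.Str.len cleaned ∧ PySem.Set.contains pvStop cleaned = false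
      then acc ++ [cleaned] else acc) []
    let compounds := (PySem.List.pyRange 0 ((words.length : Int) - 1) 1).foldl (fun acc i =>
      let word1 := PySem.Str.stripChars (PySem.List.pyGetD words i "") ",.!?;:"
      let word2 := PySem.Str.stripChars (PySem.List.pyGetD words (i + 1) "") ",.!?;:"
      if PySem.Set.contains pvStop word1 = false ∧ PySem.Set.contains pvStop word2 = false
          ∧ 3 ≤ PySem.Str.len word1 ∧ 3 ≤ PySem.Str.len word2
      then acc ++ [word1 ++ word2] else acc) []
    keywords ++ compounds

-- ===== PORT B =====
def extract_intent_keywords_py_alt (intent : String) : List String :=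
  let st := (PySem.Str.split₀ (PySem.Str.lower intent)).foldl
    (fun (st : (String × Bool) × List String × List String) w =>
      let cleaned := PySem.Str.stripChars w ",.!?;:"
      let valid := decide (3 ≤ PySem.Str.len cleaned) && !(PySem.Set.contains pvStop cleaned)
      let kws := if valid then st.2.1 ++ [cleaned] else st.2.1
      let cps := if valid && st.1.2 then st.2.2 ++ [st.1.1 ++ cleaned] else st.2.2
      ((cleaned, valid), kws, cps))
    (("", false), ([], []))
  st.2.1 ++ st.2.2

-- ===== PRECONDITION & SPEC =====
def Spec_extract_intent_keywords_py (intent : String) (out : List String) : Prop := out = extract_intent_keywords_py_alt intent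
instance (intent : String) (out : List String) : Decidable (Spec_extract_intent_keywords_py intent out) := by unfold Spec_extract_intent_keywords_py; infer_instance

-- ===== CLAIM (what is proved, stated in full; the proofs are below) =====
def Claim_equal_extract_intent_keywords_py : Prop := ∀ (intent : String), Dom_extract_intent_keywords_py intent → Spec_extract_intent_keywords_py intent (extract_intent_keywords_py intent)

-- ===== LEMMAS AND PROOFS =====

-- cleaned form and validity of one word
def pvClean (w : String) : String := PySem.Str.stripChars w ",.!?;:"
def pvValid (w : String) : Bool :=
  decide (3 ≤ PySem.Str.len (pvClean w)) && !(PySem.Set.contains pvStop (pvClean w))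

-- named forms of the two ports' loop bodies (definitionally equal to the ports' lambdas)
def pvKwStep (acc : List String) (w : String) : List String :=
  if 3 ≤ PySem.Str.len (pvClean w) ∧ PySem.Set.contains pvStop (pvClean w) = false
  then acc ++ [pvClean w] else acc

def pvCompStep (ws : List String) (acc : List String) (i : Int) : List String :=
  if PySem.Set.contains pvStop (pvClean (PySem.List.pyGetD ws i "")) = false
      ∧ PySem.Set.contains pvStop (pvClean (PySem.List.pyGetD ws (i + 1) "")) = false
      ∧ 3 ≤ PySem.Str.len (pvClean (PySem.List.pyGetD ws i ""))
      ∧ 3 ≤ PySem.Str.len (pvClean (PySem.List.pyGetD ws (i + 1) ""))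
  then acc ++ [pvClean (PySem.List.pyGetD ws i "") ++ pvClean (PySem.List.pyGetD ws (i + 1) "")]
  else acc

def pvCompStepN (ws : List String) (acc : List String) (k : Nat) : List String :=
  if PySem.Set.contains pvStop (pvClean (ws.getD k "")) = false
      ∧ PySem.Set.contains pvStop (pvClean (ws.getD (k + 1) "")) = false
      ∧ 3 ≤ PySem.Str.len (pvClean (ws.getD k ""))
      ∧ 3 ≤ PySem.Str.len (pvClean (ws.getD (k + 1) ""))
  then acc ++ [pvClean (ws.getD k "") ++ pvClean (ws.getD (k + 1) "")]
  else acc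

def pvAbody (ws : List String) : List String :=
  ws.foldl pvKwStep [] ++
    (PySem.List.pyRange 0 ((ws.length : Int) - 1) 1).foldl (pvCompStep ws) []

def pvBstep (st : (String × Bool) × List String × List String) (w : String) :
    (String × Bool) × List String × List String :=
  ((pvClean w, pvValid w),
    ((if pvValid w then st.2.1 ++ [pvClean w] else st.2.1),
     (if pvValid w && st.1.2 then st.2.2 ++ [st.1.1 ++ pvClean w] else st.2.2)))

def pvBbody (ws : List String) : List String :=
  (ws.foldl pvBstep (("", false), ([], []))).2.1 ++ (ws.foldl pvBstep (("", false), ([], []))).2.2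

-- the keywords A's first loop produces
def pvKw (ws : List String) : List String :=
  ws.flatMap (fun w => if pvValid w then [pvClean w] else [])

-- the compounds of consecutive valid words
def pvPair : List String → List String
  | [] => []
  | [_] => []
  | w1 :: w2 :: rest =>
      (if pvValid w1 && pvValid w2 then [pvClean w1 ++ pvClean w2] else []) ++ pvPair (w2 :: rest)

-- compounds produced after a previous word with cleaned form pc and validity pv
def pvAux (pc : String) (pv : Bool) : List String → List String
  | [] => []
  | w :: rest =>
      (if pvValid w && pv then [pc ++ pvClean w] else []) ++ pvAux (pvClean w) (pvValid w) rest

theorem pvKw_foldl (ws : List String) (acc : List String) :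
    ws.foldl pvKwStep acc = acc ++ pvKw ws := by
  induction ws generalizing acc with
  | nil => simp [pvKw]
  | cons w rest ih =>
      rw [List.foldl_cons, ih]
      have hc : (3 ≤ PySem.Str.len (pvClean w) ∧ PySem.Set.contains pvStop (pvClean w) = false)
          ↔ pvValid w = true := by
        simp only [pvValid, Bool.and_eq_true, decide_eq_true_eq, Bool.not_eq_true']
      have hstep : pvKwStep acc w = acc ++ (if pvValid w then [pvClean w] else []) := by
        simp only [pvKwStep]
        by_cases h1 : (3 ≤ PySem.Str.len (pvClean w) ∧ PySem.Set.contains pvStop (pvClean w) = false)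
        · rw [if_pos h1, if_pos (hc.mp h1)]
        · rw [if_neg h1, if_neg (fun hh => h1 (hc.mpr hh))]
          simp
      rw [hstep]
      simp [pvKw, List.append_assoc]

theorem pvCond (w1 w2 : String) :
    (PySem.Set.contains pvStop (pvClean w1) = false ∧ PySem.Set.contains pvStop (pvClean w2) = false
      ∧ 3 ≤ PySem.Str.len (pvClean w1) ∧ 3 ≤ PySem.Str.len (pvClean w2))
      ↔ (pvValid w1 && pvValid w2) = true := by
  simp only [pvValid, Bool.and_eq_true, decide_eq_true_eq, Bool.not_eq_true']
  constructor
  · rintro ⟨a, b, c, d⟩; exact ⟨⟨c, a⟩, ⟨d, b⟩⟩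
  · rintro ⟨⟨c, a⟩, ⟨d, b⟩⟩; exact ⟨a, b, c, d⟩

theorem pvFirst (w1 w2 : String) (rest : List String) (acc : List String) :
    pvCompStepN (w1 :: w2 :: rest) acc 0
      = acc ++ (if pvValid w1 && pvValid w2 then [pvClean w1 ++ pvClean w2] else []) := by
  have hc := pvCond w1 w2
  simp only [pvCompStepN, List.getD_cons_zero, List.getD_cons_succ]
  by_cases h1 : (PySem.Set.contains pvStop (pvClean w1) = false
      ∧ PySem.Set.contains pvStop (pvClean w2) = false
      ∧ 3 ≤ PySem.Str.len (pvClean w1) ∧ 3 ≤ PySem.Str.len (pvClean w2))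
  · rw [if_pos h1, if_pos (hc.mp h1)]
  · rw [if_neg h1, if_neg (fun hh => h1 (hc.mpr hh))]
    simp

theorem pvPair_range (ws : List String) (acc : List String) :
    (List.range (ws.length - 1)).foldl (pvCompStepN ws) acc = acc ++ pvPair ws := by
  induction ws generalizing acc with
  | nil => simp [pvPair]
  | cons w1 rest ih =>
      cases rest with
      | nil => simp [pvPair]
      | cons w2 rest' =>
          have hn : (w1 :: w2 :: rest').length - 1 = rest'.length + 1 := by simp
          rw [hn, List.range_succ_eq_map, List.foldl_cons, List.foldl_map]
          have hbody : (fun (acc : List String) (k : Nat) =>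
                pvCompStepN (w1 :: w2 :: rest') acc (Nat.succ k))
              = fun (acc : List String) (k : Nat) => pvCompStepN (w2 :: rest') acc k := by
            funext a k; rfl
          rw [hbody]
          have hlen' : rest'.length = (w2 :: rest').length - 1 := by simp
          rw [hlen', ih]
          rw [pvFirst, pvPair, List.append_assoc]

theorem pvAux_eq_pvPair_tail (w : String) (rest : List String) :
    pvAux (pvClean w) (pvValid w) rest = pvPair (w :: rest) := by
  induction rest generalizing w with
  | nil => simp [pvAux, pvPair]
  | cons w2 rest' ih =>
      simp only [pvAux, pvPair, ih w2, Bool.and_comm]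

theorem pvAux_false (ws : List String) : pvAux "" false ws = pvPair ws := by
  cases ws with
  | nil => rfl
  | cons w rest => simp [pvAux, pvAux_eq_pvPair_tail]

theorem pvB_foldl (ws : List String) (pc : String) (pv : Bool) (kws cps : List String) :
    (ws.foldl pvBstep ((pc, pv), (kws, cps))).2 = (kws ++ pvKw ws, cps ++ pvAux pc pv ws) := by
  induction ws generalizing pc pv kws cps with
  | nil => simp [pvKw, pvAux]
  | cons w rest ih =>
      rw [List.foldl_cons]
      have hstep : pvBstep ((pc, pv), (kws, cps)) w
          = ((pvClean w, pvValid w),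
             ((if pvValid w then kws ++ [pvClean w] else kws),
              (if pvValid w && pv then cps ++ [pc ++ pvClean w] else cps))) := rfl
      rw [hstep, ih]
      simp only [pvKw, List.flatMap_cons, pvAux]
      cases hval : pvValid w <;> cases pv <;>
        simp [List.append_assoc]

theorem pv_body (ws : List String) : pvAbody ws = pvBbody ws := by
  unfold pvAbody pvBbody
  have h := pvB_foldl ws "" false [] []
  rw [h]
  simp only [List.nil_append]
  rw [pvAux_false, pvKw_foldl ws [], List.nil_append]
  congr 1
  rw [PySem.List.pyRange_one]
  simp only [Int.sub_zero]
  have htn : ((ws.length : Int) - 1).toNat = ws.length - 1 := by omega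
  rw [htn, List.foldl_map]
  have hconv : (fun (acc : List String) (k : Nat) => pvCompStep ws acc (0 + (k : Int)))
      = fun (acc : List String) (k : Nat) => pvCompStepN ws acc k := by
    funext a k
    have e1 : (0 : Int) + (k : Int) = ((k : Nat) : Int) := by push_cast; ring
    have e2 : ((k : Nat) : Int) + 1 = (((k + 1 : Nat)) : Int) := by omega
    rw [pvCompStep, e1, e2, PySem.List.pyGetD_natCast, PySem.List.pyGetD_natCast]
    rfl
  rw [hconv, pvPair_range ws [], List.nil_append]

theorem extract_intent_keywords_py_eq (intent : String) :
    extract_intent_keywords_py intent = extract_intent_keywords_py_alt intent := by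
  have hA : extract_intent_keywords_py intent
      = if intent = "" then [] else pvAbody (PySem.Str.split₀ (PySem.Str.lower intent)) := rfl
  have hB : extract_intent_keywords_py_alt intent
      = pvBbody (PySem.Str.split₀ (PySem.Str.lower intent)) := rfl
  rw [hA, hB]
  by_cases h : intent = ""
  · subst h
    have hw : PySem.Str.split₀ (PySem.Str.lower "") = ([] : List String) := by decide
    rw [if_pos rfl, hw]
    rfl
  · rw [if_neg h, pv_body]

-- ===== VERDICT (by name: the statement is the Claim_ definition above) =====
theorem extract_intent_keywords_py_spec : Claim_equal_extract_intent_keywords_py := by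
  intro intent _
  exact extract_intent_keywords_py_eq intent
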